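-- pv_equiv track=rewrite | github.com/JaeyoonCheon/Algorithm | BOJ/Bruteforce/1107.py | findCloestBrute
-- ===== SOURCE A (Python) =====
-- def findCloestBrute(N, fail):
--     maxDistance = abs(100 - N)
--     maxChannel = 100
--     for i in range(1000001):
--         flag = 0
--         check = list(str(i))
--         for digit in check:
--             if int(digit) in fail:
--                 flag = 1
--                 break
--         if flag == 1:
--             continue
--         else:
--             distance = abs(N - i)
--             if distance < maxDistance:
--                 maxDistance = distance
--                 maxChannel = i
--     return maxDistance, maxChannel
-- ===== SOURCE B (Python) =====
-- def findCloestBrute(N, fail):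
--     bad = set(fail)
--
--     def ok(i):
--         return all(int(c) not in bad for c in str(i))
--
--     base = abs(100 - N)
--     if N < 0:
--         # every channel is above N; a channel i beats staying at 100 iff i < 100
--         for i in range(0, 100):
--             if ok(i):
--                 return i - N, i
--     elif N > 1000000:
--         # every channel is below N; a channel i beats staying at 100 iff i > 100
--         for i in range(1000000, 100, -1):
--             if ok(i):
--                 return N - i, i
--     else:
--         # expand outward from N; the first reachable channel found has minimal distance
--         for d in range(0, base):
--             lo, hi = N - d, N + d
--             if lo >= 0 and ok(lo):
--                 return d, lo
--             if hi <= 1000000 and ok(hi):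
--                 return d, hi
--             if lo < 0 and hi > 1000000:
--                 break
--     return base, 100
-- ===== Notes on version B (the rewrite author's own statement) =====
-- stated objective: faster
-- what changed: Instead of scanning all 1000001 channels and keeping a running best, B expands outward from N (checking N-d before N+d, stopping at the first channel with no broken digit or when d reaches |100-N|), with direct bounded scans when N lies outside [0, 1000000]; typically only a handful of candidates are inspected.
import Mathlib
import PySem

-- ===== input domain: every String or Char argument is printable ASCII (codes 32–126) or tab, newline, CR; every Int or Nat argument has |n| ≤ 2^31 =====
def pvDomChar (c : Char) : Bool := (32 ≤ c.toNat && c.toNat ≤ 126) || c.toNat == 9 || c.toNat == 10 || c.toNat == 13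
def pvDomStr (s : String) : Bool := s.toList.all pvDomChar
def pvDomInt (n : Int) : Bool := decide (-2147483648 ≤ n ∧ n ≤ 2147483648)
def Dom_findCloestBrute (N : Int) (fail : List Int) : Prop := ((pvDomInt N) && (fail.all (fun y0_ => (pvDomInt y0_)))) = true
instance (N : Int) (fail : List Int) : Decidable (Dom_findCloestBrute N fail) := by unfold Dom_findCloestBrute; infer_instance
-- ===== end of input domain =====

-- B replaces A's scan of all 1000001 channels by an outward expansion from N (N-d before N+d,
-- stopping at the first channel with no broken digit or at d = |100-N|), with direct bounded
-- scans when N lies outside [0, 1000000]; typically far fewer candidates are inspected.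

-- ===== PORT A =====
-- inner loop 'for digit in check: if int(digit) in fail: flag = 1; break'.
-- int(digit) is hand-ported as digit.toNat - 48, exact on decimal-digit characters —
-- the only characters str(i) yields for i in range(1000001).
def pvFailFlag (check : List Char) (fail : List Int) : Bool :=
  match check with
  | [] => false
  | digit :: rest =>
    if ((digit.toNat : Int) - 48) ∈ fail then true
    else pvFailFlag rest fail

def findCloestBrute (N : Int) (fail : List Int) : List Int :=
  let maxDistance := |100 - N|
  let maxChannel : Int := 100
  let r := (PySem.List.pyRange 0 1000001 1).foldl
    (fun (st : Int × Int) i =>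
      let check := PySem.Int.toChars i  -- list(str(i))
      if pvFailFlag check fail then st
      else
        let distance := |N - i|
        if distance < st.1 then (distance, i) else st)
    (maxDistance, maxChannel)
  [r.1, r.2]

-- ===== PORT B =====
-- 'ok(i)': all digits of i are pressable (set membership on the broken set);
-- int(c) is hand-ported as c.toNat - 48, exact on the decimal-digit characters of str(i)
def pvOk (bad : PySem.Set Int) (i : Int) : Bool :=
  (PySem.Int.toChars i).all
    (fun c => !(PySem.Set.contains bad ((c.toNat : Int) - 48)))

-- the middle 'for d in range(0, base)' loop with its two early returns and the break
def pvExpand (N : Int) (bad : PySem.Set Int) : List Int → Option (Int × Int)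
  | [] => none
  | d :: rest =>
    let lo := N - d
    let hi := N + d
    if 0 ≤ lo ∧ pvOk bad lo then some (d, lo)
    else if hi ≤ 1000000 ∧ pvOk bad hi then some (d, hi)
    else if lo < 0 ∧ 1000000 < hi then none
    else pvExpand N bad rest

def findCloestBrute_alt (N : Int) (fail : List Int) : List Int :=
  let bad := PySem.Set.ofList fail
  let base := |100 - N|
  if N < 0 then
    match (PySem.List.pyRange 0 100 1).find? (fun i => pvOk bad i) with
    | some i => [i - N, i]
    | none => [base, 100]
  else if 1000000 < N then
    match (PySem.List.pyRange 1000000 100 (-1)).find? (fun i => pvOk bad i) with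
    | some i => [N - i, i]
    | none => [base, 100]
  else
    match pvExpand N bad (PySem.List.pyRange 0 base 1) with
    | some (d, c) => [d, c]
    | none => [base, 100]

-- ===== PRECONDITION & SPEC =====
def Spec_findCloestBrute (N : Int) (fail : List Int) (out : List Int) : Prop := out = findCloestBrute_alt N fail
instance (N : Int) (fail : List Int) (out : List Int) : Decidable (Spec_findCloestBrute N fail out) := by unfold Spec_findCloestBrute; infer_instance

-- ===== CLAIM (what is proved, stated in full; the proofs are below) =====
def Claim_equal_findCloestBrute : Prop := ∀ (N : Int) (fail : List Int), Dom_findCloestBrute N fail → Spec_findCloestBrute N fail (findCloestBrute N fail)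

-- ===== LEMMAS AND PROOFS =====

def pvGood (fail : List Int) (i : Int) : Bool := !(pvFailFlag (PySem.Int.toChars i) fail)

def pvCand (fail : List Int) (i : Int) : Bool :=
  decide (0 ≤ i) && decide (i ≤ 1000000) && pvGood fail i

def pvHit (N : Int) (fail : List Int) (d : Int) : Bool :=
  pvCand fail (N - d) || pvCand fail (N + d)

def pvChanAt (N : Int) (fail : List Int) (d : Int) : Int :=
  if pvCand fail (N - d) then N - d else N + d

def pvStepA (N : Int) (fail : List Int) (st : Int × Int) (i : Int) : Int × Int :=
  let check := PySem.Int.toChars i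
  if pvFailFlag check fail then st
  else
    let distance := |N - i|
    if distance < st.1 then (distance, i) else st

lemma contains_ofList_eq (fail : List Int) (x : Int) :
    PySem.Set.contains (PySem.Set.ofList fail) x = decide (x ∈ fail) := by
  by_cases h : x ∈ fail <;> simp [h, PySem.Set.mem_ofList]

lemma all_eq_not_flag (fail : List Int) (cs : List Char) :
    (cs.all fun c => !decide (((c.toNat : Int) - 48) ∈ fail)) = !(pvFailFlag cs fail) := by
  induction cs with
  | nil => simp [pvFailFlag]
  | cons c rest ih =>
    by_cases h : ((c.toNat : Int) - 48) ∈ fail <;>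
      simp [pvFailFlag, h, ih]

lemma pvOk_eq_good (fail : List Int) (i : Int) :
    pvOk (PySem.Set.ofList fail) i = pvGood fail i := by
  unfold pvOk pvGood
  simp only [contains_ofList_eq]
  exact all_eq_not_flag fail _

lemma stepA_keep (N : Int) (fail : List Int) (s : Int × Int) (i : Int)
    (h : pvGood fail i = true → ¬ (|N - i| < s.1)) : pvStepA N fail s i = s := by
  unfold pvStepA
  by_cases hg : pvFailFlag (PySem.Int.toChars i) fail
  · simp [hg]
  · have : pvGood fail i = true := by simp [pvGood, hg]
    simp [hg, h this]

lemma fold_keep (N : Int) (fail : List Int) (l : List Int) (s : Int × Int)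
    (h : ∀ i ∈ l, pvGood fail i = true → ¬ (|N - i| < s.1)) :
    l.foldl (pvStepA N fail) s = s := by
  induction l with
  | nil => rfl
  | cons x t ih =>
    rw [List.foldl_cons, stepA_keep N fail s x (h x (by simp))]
    exact ih (fun i hi => h i (by simp [hi]))

lemma fold_gt (N : Int) (fail : List Int) (l : List Int) (d₀ : Int) :
    ∀ (s : Int × Int), d₀ < s.1 → (∀ i ∈ l, pvGood fail i = true → d₀ < |N - i|) →
    d₀ < (l.foldl (pvStepA N fail) s).1 := by
  induction l with
  | nil => intro s hs _; exact hs
  | cons x t ih =>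
    intro s hs h
    rw [List.foldl_cons]
    apply ih _ _ (fun i hi => h i (by simp [hi]))
    unfold pvStepA
    by_cases hg : pvFailFlag (PySem.Int.toChars x) fail
    · simpa [hg]
    · have hgood : pvGood fail x = true := by simp [pvGood, hg]
      by_cases hlt : |N - x| < s.1
      · simpa [hg, hlt] using h x (by simp) hgood
      · simpa [hg, hlt]

lemma cand_of_close (N : Int) (fail : List Int) (i : Int) (hc : pvCand fail i = true) :
    pvHit N fail (|N - i|) = true := by
  unfold pvHit
  rcases abs_cases (N - i) with ⟨h1, _⟩ | ⟨h1, _⟩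
  · have : N - |N - i| = i := by omega
    rw [this]; simp [hc]
  · have : N + |N - i| = i := by omega
    rw [this]; simp [hc]

lemma findCloestBrute_eq (N : Int) (fail : List Int) :
    findCloestBrute N fail =
      [((PySem.List.pyRange 0 1000001 1).foldl (pvStepA N fail) (|100 - N|, 100)).1,
       ((PySem.List.pyRange 0 1000001 1).foldl (pvStepA N fail) (|100 - N|, 100)).2] := rfl

lemma pvCand_iff (fail : List Int) (i : Int) :
    pvCand fail i = true ↔ 0 ≤ i ∧ i ≤ 1000000 ∧ pvGood fail i = true := by
  simp [pvCand, and_assoc]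

lemma flag_eq (fail : List Int) (i : Int) :
    pvFailFlag (PySem.Int.toChars i) fail = !pvGood fail i := by
  simp [pvGood]

lemma A_nohit (N : Int) (fail : List Int)
    (h : ∀ d, 0 ≤ d → d < |100 - N| → pvHit N fail d = false) :
    findCloestBrute N fail = [|100 - N|, 100] := by
  rw [findCloestBrute_eq]
  rw [fold_keep N fail _ (|100 - N|, 100)]
  intro i hi hgood hlt
  have hm := (PySem.List.mem_pyRange_one).1 hi
  have hc : pvCand fail i = true := (pvCand_iff fail i).2 ⟨by omega, by omega, hgood⟩
  have hh := cand_of_close N fail i hc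
  have h2 := h (|N - i|) (abs_nonneg _) hlt
  rw [hh] at h2
  simp at h2

lemma A_hit (N : Int) (fail : List Int) (d : Int) (hd0 : 0 ≤ d) (hdb : d < |100 - N|)
    (hhit : pvHit N fail d = true)
    (hmin : ∀ d', 0 ≤ d' → d' < d → pvHit N fail d' = false) :
    findCloestBrute N fail = [d, pvChanAt N fail d] := by
  -- no candidate is strictly closer than d
  have KB : ∀ i, pvCand fail i = true → ¬ (|N - i| < d) := by
    intro i hc hlt
    have hh := cand_of_close N fail i hc
    have h2 := hmin (|N - i|) (abs_nonneg _) hlt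
    rw [hh] at h2
    simp at h2
  set c₀ := pvChanAt N fail d with hc₀
  -- c₀ is a candidate at distance exactly d
  have hcand : pvCand fail c₀ = true ∧ |N - c₀| = d := by
    by_cases hcd : pvCand fail (N - d) = true
    · have : c₀ = N - d := by simp [hc₀, pvChanAt, hcd]
      rw [this]
      exact ⟨hcd, by rw [show N - (N - d) = d by ring, abs_of_nonneg hd0]⟩
    · have hcd' : pvCand fail (N - d) = false := by simpa using hcd
      have hplus : pvCand fail (N + d) = true := by
        rcases Bool.or_eq_true_iff.1 (by simpa [pvHit] using hhit) with h1 | h1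
        · rw [hcd'] at h1; exact absurd h1 (by simp)
        · exact h1
      have : c₀ = N + d := by simp [hc₀, pvChanAt, hcd']
      rw [this]
      exact ⟨hplus, by rw [show N - (N + d) = -d by ring, abs_neg, abs_of_nonneg hd0]⟩
  -- everything strictly left of c₀ is strictly farther than d
  have hstrict : ∀ i, pvCand fail i = true → i < c₀ → d < |N - i| := by
    intro i hc hi
    rcases lt_or_eq_of_le (not_lt.1 (KB i hc)) with h1 | h1
    · exact h1
    · exfalso
      have hii : i = N - d ∨ i = N + d := by
        rcases abs_cases (N - i) with ⟨h2, _⟩ | ⟨h2, _⟩ <;> omega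
      by_cases hcd : pvCand fail (N - d) = true
      · have hc₀' : c₀ = N - d := by simp [hc₀, pvChanAt, hcd]
        rcases hii with h3 | h3 <;> omega
      · have hcd' : pvCand fail (N - d) = false := by simpa using hcd
        have hc₀' : c₀ = N + d := by simp [hc₀, pvChanAt, hcd']
        rcases hii with h3 | h3
        · rw [h3] at hc; rw [hc] at hcd'; exact absurd hcd' (by simp)
        · omega
  have hc0r := (pvCand_iff fail c₀).1 hcand.1
  rw [findCloestBrute_eq]
  rw [PySem.List.pyRange_one_append 0 c₀ 1000001 (by omega) (by omega), List.foldl_append]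
  rw [PySem.List.pyRange_one_cons (show c₀ < 1000001 by omega), List.foldl_cons]
  have hs₁ : d < ((PySem.List.pyRange 0 c₀ 1).foldl (pvStepA N fail) (|100 - N|, 100)).1 := by
    apply fold_gt N fail _ d _ (by simpa using hdb)
    intro i hi hgood
    have hm := (PySem.List.mem_pyRange_one).1 hi
    exact hstrict i ((pvCand_iff fail i).2 ⟨by omega, by omega, hgood⟩) (by omega)
  have hstep : ∀ s : Int × Int, d < s.1 → pvStepA N fail s c₀ = (d, c₀) := by
    intro s hs
    unfold pvStepA
    simp only [flag_eq, hc0r.2.2, hcand.2]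
    simp [hs]
  rw [hstep _ hs₁]
  rw [fold_keep N fail _ (d, c₀)]
  intro i hi hgood hlt
  have hm := (PySem.List.mem_pyRange_one).1 hi
  exact KB i ((pvCand_iff fail i).2 ⟨by omega, by omega, hgood⟩) (by simpa using hlt)

lemma find_up (p : Int → Bool) :
    ∀ (n : ℕ) (a b : Int), (b - a).toNat = n →
    (match (PySem.List.pyRange a b 1).find? p with
     | some i => a ≤ i ∧ i < b ∧ p i = true ∧ ∀ j, a ≤ j → j < i → p j = false
     | none => ∀ j, a ≤ j → j < b → p j = false) := by
  intro n
  induction n with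
  | zero =>
    intro a b hn
    rw [PySem.List.pyRange_one_eq_nil (by omega)]
    simp only [List.find?_nil]
    intro j h1 h2; omega
  | succ n ih =>
    intro a b hn
    have hab : a < b := by omega
    rw [PySem.List.pyRange_one_cons hab]
    by_cases hp : p a = true
    · rw [List.find?_cons_of_pos hp]
      exact ⟨le_refl a, hab, hp, fun j h1 h2 => by omega⟩
    · rw [List.find?_cons_of_neg (by simpa using hp)]
      have ihs := ih (a + 1) b (by omega)
      rcases hfind : (PySem.List.pyRange (a + 1) b 1).find? p with _ | i
      · rw [hfind] at ihs
        intro j h1 h2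
        rcases eq_or_lt_of_le h1 with h3 | h3
        · rw [← h3]; simpa using hp
        · exact ihs j (by omega) h2
      · rw [hfind] at ihs
        refine ⟨by omega, ihs.2.1, ihs.2.2.1, ?_⟩
        intro j h1 h2
        rcases eq_or_lt_of_le h1 with h3 | h3
        · rw [← h3]; simpa using hp
        · exact ihs.2.2.2 j (by omega) h2

lemma find_down (p : Int → Bool) :
    ∀ (n : ℕ) (a b : Int), (a - b).toNat = n →
    (match (PySem.List.pyRange a b (-1)).find? p with
     | some i => b < i ∧ i ≤ a ∧ p i = true ∧ ∀ j, i < j → j ≤ a → p j = false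
     | none => ∀ j, b < j → j ≤ a → p j = false) := by
  intro n
  induction n with
  | zero =>
    intro a b hn
    rw [PySem.List.pyRange_neg_one_eq_nil (by omega)]
    simp only [List.find?_nil]
    intro j h1 h2; omega
  | succ n ih =>
    intro a b hn
    have hab : b < a := by omega
    rw [PySem.List.pyRange_neg_one_cons hab]
    by_cases hp : p a = true
    · rw [List.find?_cons_of_pos hp]
      exact ⟨hab, le_refl a, hp, fun j h1 h2 => by omega⟩
    · rw [List.find?_cons_of_neg (by simpa using hp)]
      have ihs := ih (a - 1) b (by omega)
      rcases hfind : (PySem.List.pyRange (a - 1) b (-1)).find? p with _ | i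
      · rw [hfind] at ihs
        intro j h1 h2
        rcases eq_or_lt_of_le h2 with h3 | h3
        · rw [h3]; simpa using hp
        · exact ihs j h1 (by omega)
      · rw [hfind] at ihs
        refine ⟨ihs.1, by omega, ihs.2.2.1, ?_⟩
        intro j h1 h2
        rcases eq_or_lt_of_le h2 with h3 | h3
        · rw [h3]; simpa using hp
        · exact ihs.2.2.2 j h1 (by omega)

lemma cand_false_of_not_lo (N a : Int) (fail : List Int)
    (h : ¬ (0 ≤ N - a ∧ pvOk (PySem.Set.ofList fail) (N - a) = true)) :
    pvCand fail (N - a) = false := by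
  rw [Bool.eq_false_iff]
  intro hc
  have h2 := (pvCand_iff fail (N - a)).1 hc
  exact h ⟨h2.1, by rw [pvOk_eq_good]; exact h2.2.2⟩

lemma cand_false_of_not_hi (N a : Int) (fail : List Int)
    (h : ¬ (N + a ≤ 1000000 ∧ pvOk (PySem.Set.ofList fail) (N + a) = true)) :
    pvCand fail (N + a) = false := by
  rw [Bool.eq_false_iff]
  intro hc
  have h2 := (pvCand_iff fail (N + a)).1 hc
  exact h ⟨h2.2.1, by rw [pvOk_eq_good]; exact h2.2.2⟩

lemma expand_sound (N : Int) (fail : List Int) (hN0 : 0 ≤ N) (hN1 : N ≤ 1000000) :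
    ∀ (n : ℕ) (a : Int), 0 ≤ a → (|100 - N| - a).toNat = n →
    (∀ d', 0 ≤ d' → d' < a → pvHit N fail d' = false) →
    (match pvExpand N (PySem.Set.ofList fail) (PySem.List.pyRange a (|100 - N|) 1) with
     | some (d, c) => 0 ≤ d ∧ d < |100 - N| ∧ pvHit N fail d = true ∧
         (∀ d', 0 ≤ d' → d' < d → pvHit N fail d' = false) ∧ c = pvChanAt N fail d
     | none => ∀ d, 0 ≤ d → d < |100 - N| → pvHit N fail d = false) := by
  intro n
  induction n with
  | zero =>
    intro a ha hn hbelow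
    rw [PySem.List.pyRange_one_eq_nil (by omega)]
    intro d h1 h2
    exact hbelow d h1 (by omega)
  | succ n ih =>
    intro a ha hn hbelow
    have hab : a < |100 - N| := by omega
    rw [PySem.List.pyRange_one_cons hab]
    simp only [pvExpand]
    by_cases h1 : 0 ≤ N - a ∧ pvOk (PySem.Set.ofList fail) (N - a) = true
    · rw [if_pos h1]
      have hcand : pvCand fail (N - a) = true :=
        (pvCand_iff fail (N - a)).2 ⟨h1.1, by omega, by rw [← pvOk_eq_good]; exact h1.2⟩
      refine ⟨ha, hab, by simp [pvHit, hcand], hbelow, ?_⟩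
      simp [pvChanAt, hcand]
    · rw [if_neg h1]
      have hlo := cand_false_of_not_lo N a fail h1
      by_cases h2 : N + a ≤ 1000000 ∧ pvOk (PySem.Set.ofList fail) (N + a) = true
      · rw [if_pos h2]
        have hcand : pvCand fail (N + a) = true :=
          (pvCand_iff fail (N + a)).2 ⟨by omega, h2.1, by rw [← pvOk_eq_good]; exact h2.2⟩
        refine ⟨ha, hab, by simp [pvHit, hcand], hbelow, ?_⟩
        simp [pvChanAt, hlo]
      · rw [if_neg h2]
        have hhi := cand_false_of_not_hi N a fail h2
        by_cases h3 : N - a < 0 ∧ 1000000 < N + a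
        · rw [if_pos h3]
          intro d hd1 hd2
          rcases lt_or_ge d a with h4 | h4
          · exact hbelow d hd1 h4
          · have hl : pvCand fail (N - d) = false := by
              rw [Bool.eq_false_iff]; intro hc
              have := (pvCand_iff fail (N - d)).1 hc; omega
            have hh : pvCand fail (N + d) = false := by
              rw [Bool.eq_false_iff]; intro hc
              have := (pvCand_iff fail (N + d)).1 hc; omega
            simp [pvHit, hl, hh]
        · rw [if_neg h3]
          apply ih (a + 1) (by omega) (by omega)
          intro d' hd1 hd2
          rcases lt_or_ge d' a with h4 | h4
          · exact hbelow d' hd1 h4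
          · have : d' = a := by omega
            rw [this]
            simp [pvHit, hlo, hhi]

lemma find_down_some (p : Int → Bool) (a b i : Int)
    (h : (PySem.List.pyRange a b (-1)).find? p = some i) :
    b < i ∧ i ≤ a ∧ p i = true ∧ ∀ j, i < j → j ≤ a → p j = false := by
  have hf := find_down p (a - b).toNat a b rfl
  rw [h] at hf
  exact hf

lemma find_down_none (p : Int → Bool) (a b : Int)
    (h : (PySem.List.pyRange a b (-1)).find? p = none) :
    ∀ j, b < j → j ≤ a → p j = false := by
  have hf := find_down p (a - b).toNat a b rfl
  rw [h] at hf
  exact hf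

-- ===== VERDICT (by name: the statement is the Claim_ definition above) =====
set_option maxRecDepth 8000 in
theorem findCloestBrute_spec : Claim_equal_findCloestBrute := by
  intro N fail _
  unfold Spec_findCloestBrute
  simp only [findCloestBrute_alt]
  by_cases hneg : N < 0
  · rw [if_pos hneg]
    have hbase : |100 - N| = 100 - N := abs_of_pos (by omega)
    have hf := find_up (fun i => pvOk (PySem.Set.ofList fail) i) ((100:Int) - 0).toNat 0 100 rfl
    rcases hfind : (PySem.List.pyRange 0 100 1).find? (fun i => pvOk (PySem.Set.ofList fail) i) with _ | i
    · rw [hfind] at hf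
      simp only at hf
      rw [A_nohit N fail]
      intro d hd1 hd2
      have hl : pvCand fail (N - d) = false := by
        rw [Bool.eq_false_iff]; intro hc
        have := (pvCand_iff fail (N - d)).1 hc; omega
      have hh : pvCand fail (N + d) = false := by
        rw [Bool.eq_false_iff]; intro hc
        have h2 := (pvCand_iff fail (N + d)).1 hc
        have h3 := hf (N + d) (by omega) (by omega)
        rw [pvOk_eq_good] at h3
        rw [h2.2.2] at h3
        exact absurd h3 (by simp)
      simp [pvHit, hl, hh]
    · rw [hfind] at hf
      simp only at hf
      have hiN : N + (i - N) = i := by ring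
      have h2N : N - (i - N) = 2 * N - i := by ring
      have hcand : pvCand fail i = true :=
        (pvCand_iff fail i).2 ⟨hf.1, by omega, by rw [← pvOk_eq_good]; exact hf.2.2.1⟩
      have hlo : pvCand fail (N - (i - N)) = false := by
        rw [Bool.eq_false_iff]; intro hc
        have := (pvCand_iff fail (N - (i - N))).1 hc; omega
      rw [A_hit N fail (i - N) (by omega) (by omega) ?_ ?_]
      · simp [pvChanAt, hlo, hiN]
      · rw [pvHit, hiN]
        simp [hcand]
      · intro d' hd1 hd2
        have hl : pvCand fail (N - d') = false := by
          rw [Bool.eq_false_iff]; intro hc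
          have := (pvCand_iff fail (N - d')).1 hc; omega
        have hh : pvCand fail (N + d') = false := by
          rw [Bool.eq_false_iff]; intro hc
          have h2 := (pvCand_iff fail (N + d')).1 hc
          have h3 := hf.2.2.2 (N + d') (by omega) (by omega)
          rw [pvOk_eq_good] at h3
          rw [h2.2.2] at h3
          exact absurd h3 (by simp)
        simp [pvHit, hl, hh]
  · rw [if_neg hneg]
    by_cases hbig : 1000000 < N
    · rw [if_pos hbig]
      have hbase : |100 - N| = N - 100 := by
        rw [abs_of_neg (by omega)]; ring
      rcases hfind : (PySem.List.pyRange 1000000 100 (-1)).find? (fun i => pvOk (PySem.Set.ofList fail) i) with _ | i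
      · have hf := find_down_none _ _ _ hfind
        simp only at hf
        rw [A_nohit N fail]
        intro d hd1 hd2
        have hh : pvCand fail (N + d) = false := by
          rw [Bool.eq_false_iff]; intro hc
          have := (pvCand_iff fail (N + d)).1 hc; omega
        have hl : pvCand fail (N - d) = false := by
          rw [Bool.eq_false_iff]; intro hc
          have h2 := (pvCand_iff fail (N - d)).1 hc
          have h3 := hf (N - d) (by omega) (by omega)
          rw [pvOk_eq_good] at h3
          rw [h2.2.2] at h3
          exact absurd h3 (by simp)
        simp [pvHit, hl, hh]
      · have hf := find_down_some _ _ _ _ hfind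
        simp only at hf
        have hiN : N - (N - i) = i := by ring
        have hcand : pvCand fail i = true :=
          (pvCand_iff fail i).2 ⟨by omega, by omega, by rw [← pvOk_eq_good]; exact hf.2.2.1⟩
        rw [A_hit N fail (N - i) (by omega) (by omega) ?_ ?_]
        · simp [pvChanAt, hiN, hcand]
        · rw [pvHit, hiN]
          simp [hcand]
        · intro d' hd1 hd2
          have hh : pvCand fail (N + d') = false := by
            rw [Bool.eq_false_iff]; intro hc
            have := (pvCand_iff fail (N + d')).1 hc; omega
          have hl : pvCand fail (N - d') = false := by
            rw [Bool.eq_false_iff]; intro hc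
            have h2 := (pvCand_iff fail (N - d')).1 hc
            have h3 := hf.2.2.2 (N - d') (by omega) (by omega)
            rw [pvOk_eq_good] at h3
            rw [h2.2.2] at h3
            exact absurd h3 (by simp)
          simp [pvHit, hl, hh]
    · rw [if_neg hbig]
      have hE := expand_sound N fail (by omega) (by omega) (|100 - N| - 0).toNat 0 le_rfl rfl
        (fun d' hd1 hd2 => absurd hd2 (by omega))
      rcases hres : pvExpand N (PySem.Set.ofList fail) (PySem.List.pyRange 0 (|100 - N|) 1) with _ | ⟨d, c⟩
      · rw [hres] at hE
        exact A_nohit N fail hE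
      · rw [hres] at hE
        rw [A_hit N fail d hE.1 hE.2.1 hE.2.2.1 hE.2.2.2.1, hE.2.2.2.2]
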